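-- pv_equiv track=rewrite | github.com/ptk18/ADA_dynamic_programming | number_picking.py | check
-- ===== SOURCE A (Python) =====
-- def check(s):
--     winning_possibility = "No"
--     if len(s) < 2:
--         winning_possibility = "Yes"
--     elif len(s) >= 2 and (abs(s[0]-s[1]) <= 9 or abs(s[0]-s[-1]) <= 9):
--         winning_possibility = "Yes"
--         s = s[:1]
--         return check(s)
--     elif len(s) >= 2 and (abs(s[-1]-s[0]) <= 9 or abs(s[-1]-s[-2]) <= 9):
--         winning_possibility = "Yes"
--         s.pop()
--         return check(s)
--     else:
--         winning_possibility = "No"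
--     return winning_possibility
-- ===== SOURCE B (Python) =====
-- def check(s):
--     n = len(s)
--     if n < 2 or abs(s[0] - s[1]) <= 9:
--         return "Yes"
--     # lowest end-index reachable by stripping tail elements whose adjacent difference is <= 9
--     j = n - 1
--     while j > 1 and abs(s[j] - s[j - 1]) <= 9:
--         j -= 1
--     return "Yes" if any(abs(s[0] - s[k]) <= 9 for k in range(j, n)) else "No"
-- ===== Notes on version B (the rewrite author's own statement) =====
-- stated objective: alternative
-- what changed: Replaces A's recursion with slicing/in-place pop by two non-mutating index scans: one right-to-left scan finds the lowest endpoint reachable by popping (adjacent tail differences <= 9), then one pass checks whether any reachable endpoint is within 9 of the first element; returns the same value without mutating the caller's list.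
import Mathlib
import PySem

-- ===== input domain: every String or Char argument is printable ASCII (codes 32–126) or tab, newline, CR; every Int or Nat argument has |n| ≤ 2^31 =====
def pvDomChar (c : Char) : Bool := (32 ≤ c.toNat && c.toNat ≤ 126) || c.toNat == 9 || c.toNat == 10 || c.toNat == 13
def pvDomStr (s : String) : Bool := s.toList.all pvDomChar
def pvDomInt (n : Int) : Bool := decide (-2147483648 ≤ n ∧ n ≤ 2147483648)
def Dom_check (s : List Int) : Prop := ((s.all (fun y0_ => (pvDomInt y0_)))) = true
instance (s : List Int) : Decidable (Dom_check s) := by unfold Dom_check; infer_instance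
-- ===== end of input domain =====

-- B replaces A's recursion (with slicing / in-place pop) by two non-mutating index scans; the
-- equivalence is about the RETURN value only: A pops elements off the caller's list, B never mutates it.

-- ===== PORT A =====
-- pyGetD defaults are only reached in-range: every access is guarded by len(s) >= 2.
def check (s : List Int) : String :=
  if s.length < 2 then "Yes"
  else if 2 ≤ s.length ∧
      (|PySem.List.pyGetD s 0 0 - PySem.List.pyGetD s 1 0| ≤ 9 ∨
       |PySem.List.pyGetD s 0 0 - PySem.List.pyGetD s (-1) 0| ≤ 9) then
    check (PySem.List.slice s none (some 1))          -- s = s[:1]; return check(s)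
  else if 2 ≤ s.length ∧
      (|PySem.List.pyGetD s (-1) 0 - PySem.List.pyGetD s 0 0| ≤ 9 ∨
       |PySem.List.pyGetD s (-1) 0 - PySem.List.pyGetD s (-2) 0| ≤ 9) then
    check s.dropLast                                   -- s.pop(); return check(s)
  else "No"
termination_by s.length
decreasing_by
  · have h1 : (PySem.List.slice s none (some 1)).length ≤ 1 := by
      simp [PySem.List.slice]
    omega
  · have := s.length_dropLast
    omega

-- ===== PORT B =====
-- the while-loop of Source B: lower j while j > 1 and abs(s[j]-s[j-1]) <= 9
def findLow (s : List Int) (j : Nat) : Nat :=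
  if 1 < j ∧ |PySem.List.pyGetD s (j : Int) 0 - PySem.List.pyGetD s ((j : Int) - 1) 0| ≤ 9 then
    findLow s (j - 1)
  else j
termination_by j

def check_alt (s : List Int) : String :=
  if s.length < 2 ∨ |PySem.List.pyGetD s 0 0 - PySem.List.pyGetD s 1 0| ≤ 9 then "Yes"
  else if (PySem.List.pyRange ((findLow s (s.length - 1)) : Int) (s.length : Int) 1).any
      (fun k => decide (|PySem.List.pyGetD s 0 0 - PySem.List.pyGetD s k 0| ≤ 9)) then "Yes"
  else "No"

-- ===== PRECONDITION & SPEC =====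
def Spec_check (s : List Int) (out : String) : Prop := out = check_alt s
instance (s : List Int) (out : String) : Decidable (Spec_check s out) := by unfold Spec_check; infer_instance

-- ===== CLAIM (what is proved, stated in full; the proofs are below) =====
def Claim_equal_check : Prop := ∀ (s : List Int), Dom_check s → Spec_check s (check s)

-- ===== LEMMAS AND PROOFS =====

theorem check_short (s : List Int) (h : s.length < 2) : check s = "Yes" := by
  rw [check]; simp [h]

theorem getD_dropLast (s : List Int) (k : Nat) (h : k < s.length - 1) :
    s.dropLast.getD k 0 = s.getD k 0 := by
  rw [List.getD_eq_getElem?_getD, List.getD_eq_getElem?_getD, List.getElem?_dropLast, if_pos h]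

theorem pyGetD_neg_one' (s : List Int) (h : 1 ≤ s.length) :
    PySem.List.pyGetD s (-1) 0 = s.getD (s.length - 1) 0 := by
  rw [PySem.List.pyGetD_neg_ofNat s 1 0 (by omega) (by omega),
    List.getD_eq_getElem _ _ (by omega)]

theorem pyGetD_neg_two' (s : List Int) (h : 2 ≤ s.length) :
    PySem.List.pyGetD s (-2) 0 = s.getD (s.length - 2) 0 := by
  rw [PySem.List.pyGetD_neg_ofNat s 2 0 (by omega) (by omega),
    List.getD_eq_getElem _ _ (by omega)]

theorem findLow_le (s : List Int) (j : Nat) : findLow s j ≤ j := by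
  fun_induction findLow with
  | case1 j h ih => omega
  | case2 j h => omega

theorem findLow_cond_true (s : List Int) (j : Nat) (h1 : 1 < j)
    (h2 : |s.getD j 0 - s.getD (j - 1) 0| ≤ 9) : findLow s j = findLow s (j - 1) := by
  rw [findLow]
  rw [if_pos]
  refine ⟨h1, ?_⟩
  have e1 : PySem.List.pyGetD s (j : Int) 0 = s.getD j 0 := by simp [pysem]
  have e2 : ((j : Int) - 1) = ((j - 1 : Nat) : Int) := by omega
  have e3 : PySem.List.pyGetD s ((j : Int) - 1) 0 = s.getD (j - 1) 0 := by
    rw [e2]; simp [pysem]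
  rw [e1, e3]; exact h2

theorem findLow_cond_false (s : List Int) (j : Nat)
    (h : ¬ (1 < j ∧ |s.getD j 0 - s.getD (j - 1) 0| ≤ 9)) : findLow s j = j := by
  rw [findLow, if_neg]
  intro ⟨a, b⟩
  apply h
  refine ⟨a, ?_⟩
  have e1 : PySem.List.pyGetD s (j : Int) 0 = s.getD j 0 := by simp [pysem]
  have e2 : ((j : Int) - 1) = ((j - 1 : Nat) : Int) := by omega
  rw [e1, e2] at b
  simp only [PySem.List.pyGetD_natCast] at b
  exact b

theorem findLow_dropLast (s : List Int) (j : Nat) (h : j + 2 ≤ s.length) :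
    findLow s.dropLast j = findLow s j := by
  induction j using Nat.strong_induction_on with
  | _ j IH =>
    by_cases hc : 1 < j ∧ |s.getD j 0 - s.getD (j - 1) 0| ≤ 9
    · obtain ⟨hj, hd⟩ := hc
      have e1 : s.dropLast.getD j 0 = s.getD j 0 := getD_dropLast s j (by omega)
      have e2 : s.dropLast.getD (j - 1) 0 = s.getD (j - 1) 0 := getD_dropLast s (j - 1) (by omega)
      rw [findLow_cond_true s j hj hd, findLow_cond_true s.dropLast j hj (by rw [e1, e2]; exact hd)]
      exact IH (j - 1) (by omega) (by omega)
    · have e1 : s.dropLast.getD j 0 = s.getD j 0 := getD_dropLast s j (by omega)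
      have e2 : s.dropLast.getD (j - 1) 0 = s.getD (j - 1) 0 := getD_dropLast s (j - 1) (by omega)
      rw [findLow_cond_false s j hc, findLow_cond_false s.dropLast j (by rw [e1, e2]; exact hc)]

theorem check_alt_yes_of_endpoint (s : List Int) (h2 : 2 ≤ s.length)
    (hC : |s.getD 0 0 - s.getD (s.length - 1) 0| ≤ 9) : check_alt s = "Yes" := by
  rw [check_alt]
  by_cases hab : |PySem.List.pyGetD s 0 0 - PySem.List.pyGetD s 1 0| ≤ 9
  · rw [if_pos (Or.inr hab)]
  · rw [if_neg (by push Not; exact ⟨by omega, by omega⟩)]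
    rw [if_pos]
    rw [List.any_eq_true]
    refine ⟨((s.length - 1 : Nat) : Int), ?_, ?_⟩
    · rw [PySem.List.mem_pyRange_one]
      have := findLow_le s (s.length - 1)
      constructor <;> [exact_mod_cast Nat.cast_le.mpr this; omega]
    · simp only [PySem.List.pyGetD_natCast, PySem.List.pyGetD_zero, decide_eq_true_eq]
      exact hC

theorem main_equiv : ∀ (s : List Int), check s = check_alt s := by
  suffices H : ∀ (n : Nat) (s : List Int), s.length = n → check s = check_alt s by
    intro s; exact H s.length s rfl
  intro n
  induction n using Nat.strong_induction_on with
  | _ n IH =>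
    intro s hs
    by_cases h0 : s.length < 2
    · rw [check_short s h0, check_alt, if_pos (Or.inl h0)]
    · push Not at h0
      -- canonical forms of the four accesses
      have hA : PySem.List.pyGetD s 0 0 = s.getD 0 0 := PySem.List.pyGetD_zero s 0
      have hB : PySem.List.pyGetD s 1 0 = s.getD 1 0 := PySem.List.pyGetD_ofNat' s 1 0
      have hL : PySem.List.pyGetD s (-1) 0 = s.getD (s.length - 1) 0 := pyGetD_neg_one' s (by omega)
      have hP : PySem.List.pyGetD s (-2) 0 = s.getD (s.length - 2) 0 := pyGetD_neg_two' s h0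
      by_cases h2 : |s.getD 0 0 - s.getD 1 0| ≤ 9 ∨ |s.getD 0 0 - s.getD (s.length - 1) 0| ≤ 9
      · -- A takes branch 2: recursion on s[:1], which returns "Yes"
        rw [check, if_neg (by omega), if_pos (by rw [hA, hB, hL]; exact ⟨h0, h2⟩)]
        rw [check_short _ (by simp [PySem.List.slice])]
        rcases h2 with h2 | h2
        · rw [check_alt, if_pos (Or.inr (by rw [hA, hB]; exact h2))]
        · exact (check_alt_yes_of_endpoint s h0 h2).symm
      · push Not at h2
        obtain ⟨hab, haL⟩ := h2
        have hc2 : ¬ (s.length < 2 ∨ |PySem.List.pyGetD s 0 0 - PySem.List.pyGetD s 1 0| ≤ 9) := by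
          push Not
          exact ⟨by omega, by rw [hA, hB]; exact hab⟩
        by_cases h3 : |s.getD (s.length - 1) 0 - s.getD (s.length - 2) 0| ≤ 9
        · -- pop branch; forces length ≥ 3
          have hn3 : 3 ≤ s.length := by
            by_contra hlt
            have e2 : s.length - 2 = 0 := by omega
            rw [e2] at h3
            have : |s.getD 0 0 - s.getD (s.length - 1) 0| ≤ 9 := by
              rw [abs_sub_comm]; exact h3
            omega
          rw [check, if_neg (by omega),
            if_neg (by rw [hA, hB, hL]; push Not; exact fun _ => ⟨hab, haL⟩),
            if_pos (by rw [hA, hL, hP]; exact ⟨h0, Or.inr h3⟩)]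
          rw [IH (s.length - 1) (by omega) s.dropLast (by simp [hs])]
          -- now: check_alt s.dropLast = check_alt s
          have hlen' : s.dropLast.length = s.length - 1 := s.length_dropLast
          have e0 : s.dropLast.getD 0 0 = s.getD 0 0 := getD_dropLast s 0 (by omega)
          have e1 : s.dropLast.getD 1 0 = s.getD 1 0 := getD_dropLast s 1 (by omega)
          have hj : findLow s.dropLast (s.dropLast.length - 1) = findLow s (s.length - 1) := by
            rw [hlen', findLow_cond_true s (s.length - 1) (by omega)
              (by rw [show s.length - 1 - 1 = s.length - 2 from by omega]; exact h3)]
            rw [show s.length - 1 - 1 = s.length - 2 from by omega]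
            exact findLow_dropLast s (s.length - 2) (by omega)
          have hc1 : ¬ (s.dropLast.length < 2 ∨
              |PySem.List.pyGetD s.dropLast 0 0 - PySem.List.pyGetD s.dropLast 1 0| ≤ 9) := by
            push Not
            refine ⟨by omega, ?_⟩
            rw [PySem.List.pyGetD_zero, PySem.List.pyGetD_ofNat', e0, e1]
            exact hab
          rw [check_alt, check_alt, if_neg hc1, if_neg hc2]
          -- the two `any`s agree
          have hjle : findLow s (s.length - 1) ≤ s.length - 1 := findLow_le s (s.length - 1)
          have hsplit : PySem.List.pyRange ((findLow s (s.length - 1)) : Int) (s.length : Int) 1 =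
              PySem.List.pyRange ((findLow s (s.length - 1)) : Int) ((s.length - 1 : Nat) : Int) 1
                ++ [((s.length - 1 : Nat) : Int)] := by
            rw [show (s.length : Int) = ((s.length - 1 : Nat) : Int) + 1 from by omega,
              PySem.List.pyRange_one_succ_right (by exact_mod_cast hjle)]
          rw [hj, hlen', hsplit, List.any_append]
          have hlast : (([((s.length - 1 : Nat) : Int)]).any
              (fun k => decide (|PySem.List.pyGetD s 0 0 - PySem.List.pyGetD s k 0| ≤ 9))) = false := by
            simp only [List.any_cons, List.any_nil, Bool.or_false, PySem.List.pyGetD_natCast,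
              PySem.List.pyGetD_zero, decide_eq_false_iff_not]
            exact not_le.mpr haL
          rw [hlast, Bool.or_false]
          have hcongr : (PySem.List.pyRange ((findLow s (s.length - 1)) : Int) ((s.length - 1 : Nat) : Int) 1).any
              (fun k => decide (|PySem.List.pyGetD s.dropLast 0 0 - PySem.List.pyGetD s.dropLast k 0| ≤ 9)) =
              (PySem.List.pyRange ((findLow s (s.length - 1)) : Int) ((s.length - 1 : Nat) : Int) 1).any
              (fun k => decide (|PySem.List.pyGetD s 0 0 - PySem.List.pyGetD s k 0| ≤ 9)) := by
            apply PySem.List.any_congr_mem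
            intro k hk
            rw [PySem.List.mem_pyRange_one] at hk
            obtain ⟨hk1, hk2⟩ := hk
            have hknn : 0 ≤ k := le_trans (by positivity) hk1
            have hkn : k.toNat < s.length - 1 := by omega
            rw [PySem.List.pyGetD_of_nonneg _ _ hknn, PySem.List.pyGetD_of_nonneg _ _ hknn,
              PySem.List.pyGetD_zero, PySem.List.pyGetD_zero, e0,
              getD_dropLast s k.toNat (by omega)]
          rw [hcongr]
        · -- A returns "No"
          rw [check, if_neg (by omega),
            if_neg (by rw [hA, hB, hL]; push Not; exact fun _ => ⟨hab, haL⟩),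
            if_neg (by
              rw [hA, hL, hP]
              push Not
              intro _
              exact ⟨by rw [abs_sub_comm]; exact haL, not_le.mp h3⟩)]
          rw [check_alt, if_neg hc2]
          rw [if_neg]
          have hfl : findLow s (s.length - 1) = s.length - 1 := by
            apply findLow_cond_false
            intro ⟨hg1, hg2⟩
            rw [show s.length - 1 - 1 = s.length - 2 from by omega] at hg2
            exact h3 hg2
          rw [hfl,
            show (s.length : Int) = ((s.length - 1 : Nat) : Int) + 1 from by omega,
            PySem.List.pyRange_one_singleton]
          simp only [List.any_cons, List.any_nil, Bool.or_false, PySem.List.pyGetD_natCast,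
            PySem.List.pyGetD_zero, decide_eq_true_eq]
          exact not_le.mpr haL

-- ===== VERDICT (by name: the statement is the Claim_ definition above) =====
theorem check_spec : Claim_equal_check := by
  intro s _
  unfold Spec_check
  exact main_equiv s
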